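-- pv_equiv track=rewrite | github.com/BullionBear/solvexity | adhoc/solvexity_v1/solvexity/trader/feed/online_spot_feed.py | find_missing_intervals
-- ===== SOURCE A (Python) =====
-- from bisect import bisect_left, bisect_right
--
-- def find_missing_intervals(x, start, end):
--     # Initialize the result list
--     missing_intervals = []
--
--     # Use binary search to find the starting point within the range
--     left = bisect_left(x, start)
--     right = bisect_right(x, end)
--
--     # Add the first missing interval if necessary
--     if left == 0 or x[left - 1] < start:
--         current_start = start
--     else:
--         current_start = x[left - 1] + 1
--
--     # Traverse only relevant portion of the list
--     for i in range(left, right):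
--         if x[i] > current_start:
--             missing_intervals.append([current_start, x[i] - 1])
--         current_start = x[i] + 1
--
--     # Add the final missing interval, if necessary
--     if current_start <= end:
--         missing_intervals.append([current_start, end])
--
--     return missing_intervals
-- ===== SOURCE B (Python) =====
-- from bisect import bisect_left, bisect_right
--
-- def _gaps(lo, hi, vals):
--     # divide and conquer: the missing intervals of [lo, hi] not covered by vals
--     if not vals:
--         return [[lo, hi]] if lo <= hi else []
--     m = len(vals) // 2
--     v = vals[m]
--     return _gaps(lo, v - 1, vals[:m]) + _gaps(v + 1, hi, vals[m + 1:])
--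
-- def find_missing_intervals(x, start, end):
--     left = bisect_left(x, start)
--     right = bisect_right(x, end)
--     if left == 0 or x[left - 1] < start:
--         lo = start
--     else:
--         lo = x[left - 1] + 1
--     return _gaps(lo, end, x[left:right])
-- ===== Notes on version B (the rewrite author's own statement) =====
-- stated objective: alternative
-- what changed: Replaces A's single left-to-right pass with a running current_start cursor by a divide-and-conquer recursion: split the in-range slice at its middle element v and recursively compute the gaps of [lo, v-1] in the left half and of [v+1, end] in the right half, with the empty slice as the base interval case.
import Mathlib
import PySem

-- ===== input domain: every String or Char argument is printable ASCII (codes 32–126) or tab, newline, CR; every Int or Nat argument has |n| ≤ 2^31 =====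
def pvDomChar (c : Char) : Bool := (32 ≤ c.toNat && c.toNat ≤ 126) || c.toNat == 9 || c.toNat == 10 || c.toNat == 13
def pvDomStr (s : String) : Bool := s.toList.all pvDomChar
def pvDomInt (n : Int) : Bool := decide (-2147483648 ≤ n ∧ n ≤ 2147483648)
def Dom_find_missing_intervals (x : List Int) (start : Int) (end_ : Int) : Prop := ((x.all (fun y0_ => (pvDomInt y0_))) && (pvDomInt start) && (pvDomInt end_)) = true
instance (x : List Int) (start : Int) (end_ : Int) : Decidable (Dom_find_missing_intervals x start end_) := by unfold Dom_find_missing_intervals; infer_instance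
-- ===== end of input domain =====

-- B replaces A's linear running-cursor scan by a divide-and-conquer recursion that splits
-- the in-range slice at its middle element; alternative decomposition, same result on ALL inputs.

-- ===== PORT A =====
-- Python's bisect_left / bisect_right inner while-loops (both Pythons import bisect);
-- fuel = len(x) bounds the iteration count (hi - lo ≤ fuel and it strictly shrinks).
def pyBisectLeftLoop (x : List Int) (v : Int) (fuel : Nat) (lo hi : Nat) : Nat :=
  match fuel with
  | 0 => lo
  | fuel + 1 =>
    if lo < hi then
      if x.getD ((lo + hi) / 2) 0 < v then pyBisectLeftLoop x v fuel ((lo + hi) / 2 + 1) hi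
      else pyBisectLeftLoop x v fuel lo ((lo + hi) / 2)
    else lo

def pyBisectRightLoop (x : List Int) (v : Int) (fuel : Nat) (lo hi : Nat) : Nat :=
  match fuel with
  | 0 => lo
  | fuel + 1 =>
    if lo < hi then
      if v < x.getD ((lo + hi) / 2) 0 then pyBisectRightLoop x v fuel lo ((lo + hi) / 2)
      else pyBisectRightLoop x v fuel ((lo + hi) / 2 + 1) hi
    else lo

def pyBisectLeft (x : List Int) (v : Int) : Nat := pyBisectLeftLoop x v x.length 0 x.length
def pyBisectRight (x : List Int) (v : Int) : Nat := pyBisectRightLoop x v x.length 0 x.length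

-- A: running current_start, fold over indices range(left, right); getD is exact since
-- all indices used are in range (left, right ≤ len; x[left-1] only read when left > 0).
def find_missing_intervals (x : List Int) (start : Int) (end_ : Int) : List (List Int) :=
  let left := pyBisectLeft x start
  let right := pyBisectRight x end_
  let current_start : Int :=
    if left == 0 || x.getD (left - 1) 0 < start then start else x.getD (left - 1) 0 + 1
  let s := (List.range' left (right - left)).foldl
      (fun (st : List (List Int) × Int) i =>
        ((if x.getD i 0 > st.2 then st.1 ++ [[st.2, x.getD i 0 - 1]] else st.1),
         x.getD i 0 + 1)) (([] : List (List Int)), current_start)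
  if s.2 ≤ end_ then s.1 ++ [[s.2, end_]] else s.1

-- ===== PORT B =====
-- B's helper _gaps: divide and conquer, split the covered points at the middle element;
-- vals[m] is exact via getD since m < len when vals ≠ []; fuel = |vals| bounds the
-- recursion depth (each recursive call strictly shrinks the list, so fuel never runs out).
def pyGapsGo (fuel : Nat) (lo hi : Int) (vals : List Int) : List (List Int) :=
  if vals.isEmpty then (if lo ≤ hi then [[lo, hi]] else [])
  else
    match fuel with
    | 0 => []   -- unreachable when vals.length ≤ fuel
    | fuel + 1 =>
      let m := vals.length / 2
      let v := vals.getD m 0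
      pyGapsGo fuel lo (v - 1) (vals.take m) ++ pyGapsGo fuel (v + 1) hi (vals.drop (m + 1))

def pyGaps (lo hi : Int) (vals : List Int) : List (List Int) :=
  pyGapsGo vals.length lo hi vals

-- B: same bisect prologue, then the recursion on the slice x[left:right]
-- (exact as drop/take since left, right ≤ len).
def find_missing_intervals_alt (x : List Int) (start : Int) (end_ : Int) : List (List Int) :=
  let left := pyBisectLeft x start
  let right := pyBisectRight x end_
  let lo : Int :=
    if left == 0 || x.getD (left - 1) 0 < start then start else x.getD (left - 1) 0 + 1
  pyGaps lo end_ ((x.drop left).take (right - left))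

-- ===== PRECONDITION & SPEC =====
def Spec_find_missing_intervals (x : List Int) (start : Int) (end_ : Int) (out : List (List Int)) : Prop := out = find_missing_intervals_alt x start end_
instance (x : List Int) (start : Int) (end_ : Int) (out : List (List Int)) : Decidable (Spec_find_missing_intervals x start end_ out) := by unfold Spec_find_missing_intervals; infer_instance

-- ===== CLAIM (what is proved, stated in full; the proofs are below) =====
def Claim_equal_find_missing_intervals : Prop := ∀ (x : List Int) (start : Int) (end_ : Int), Dom_find_missing_intervals x start end_ → Spec_find_missing_intervals x start end_ (find_missing_intervals x start end_)

-- ===== LEMMAS AND PROOFS =====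

-- reference scanline function: gaps of [lo, hi] between consecutive covered points
def gRef (lo hi : Int) : List Int → List (List Int)
  | [] => if lo ≤ hi then [[lo, hi]] else []
  | v :: vs => (if lo ≤ v - 1 then [[lo, v - 1]] else []) ++ gRef (v + 1) hi vs

theorem pyBisectLeftLoop_le (x : List Int) (v : Int) (fuel : Nat) :
    ∀ (lo hi : Nat), lo ≤ hi → pyBisectLeftLoop x v fuel lo hi ≤ hi := by
  induction fuel with
  | zero => intro lo hi h; simpa [pyBisectLeftLoop]
  | succ fuel ih =>
    intro lo hi h
    rw [pyBisectLeftLoop]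
    split_ifs with h1 h2
    · exact ih _ _ (by omega)
    · exact le_trans (ih _ _ (by omega)) (by omega)
    · exact h

theorem pyBisectRightLoop_le (x : List Int) (v : Int) (fuel : Nat) :
    ∀ (lo hi : Nat), lo ≤ hi → pyBisectRightLoop x v fuel lo hi ≤ hi := by
  induction fuel with
  | zero => intro lo hi h; simpa [pyBisectRightLoop]
  | succ fuel ih =>
    intro lo hi h
    rw [pyBisectRightLoop]
    split_ifs with h1 h2
    · exact le_trans (ih _ _ (by omega)) (by omega)
    · exact ih _ _ (by omega)
    · exact h

-- A's indexed fold equals the same fold over the slice as a list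
theorem foldl_range'_getD {σ : Type} (x : List Int) (f : σ → Int → σ) :
    ∀ (n left : Nat) (s : σ), left + n ≤ x.length →
      (List.range' left n).foldl (fun s i => f s (x.getD i 0)) s
        = ((x.drop left).take n).foldl f s := by
  intro n
  induction n with
  | zero => intro left s h; simp
  | succ n ih =>
    intro left s h
    have hlt : left < x.length := by omega
    rw [List.range'_succ, List.drop_eq_getElem_cons hlt]
    simp only [List.foldl_cons, List.take_succ_cons]
    rw [ih (left + 1) _ (by omega)]
    congr 1
    rw [List.getD_eq_getElem x 0 hlt]

-- A's scan over a list, with the trailing interval, is gRef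
theorem foldA (e : Int) (l : List Int) :
    ∀ (acc : List (List Int)) (cs : Int),
      (let s := l.foldl (fun (st : List (List Int) × Int) v =>
          ((if v > st.2 then st.1 ++ [[st.2, v - 1]] else st.1), v + 1)) (acc, cs)
       if s.2 ≤ e then s.1 ++ [[s.2, e]] else s.1)
        = acc ++ gRef cs e l := by
  induction l with
  | nil => intro acc cs; by_cases h : cs ≤ e <;> simp [gRef, h]
  | cons v l ih =>
    intro acc cs
    simp only [List.foldl_cons, gRef]
    rw [ih]
    by_cases h : v > cs
    · rw [if_pos h, if_pos (by omega : cs ≤ v - 1)]; simp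
    · rw [if_neg h, if_neg (by omega : ¬ cs ≤ v - 1)]; simp

-- the split identity for gRef (unconditional)
theorem gRef_split (v hi : Int) (L R : List Int) :
    ∀ lo, gRef lo hi (L ++ v :: R) = gRef lo (v - 1) L ++ gRef (v + 1) hi R := by
  induction L with
  | nil => intro lo; simp [gRef]
  | cons w L ih => intro lo; simp only [List.cons_append, gRef, ih, List.append_assoc]

-- B's divide-and-conquer recursion computes gRef (fuel suffices: each call shrinks vals)
theorem pyGapsGo_eq_gRef (fuel : Nat) :
    ∀ (lo hi : Int) (vals : List Int), vals.length ≤ fuel →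
      pyGapsGo fuel lo hi vals = gRef lo hi vals := by
  induction fuel with
  | zero =>
    intro lo hi vals hlen
    have : vals = [] := List.eq_nil_of_length_eq_zero (by omega)
    subst this
    simp [pyGapsGo, gRef]
  | succ fuel ih =>
    intro lo hi vals hlen
    rw [pyGapsGo]
    cases hv : vals.isEmpty with
    | true =>
      rw [List.isEmpty_iff] at hv
      subst hv
      simp [gRef]
    | false =>
      have hp : 0 < vals.length :=
        List.length_pos_iff.mpr (by simpa [List.isEmpty_iff] using hv)
      have hmlt : vals.length / 2 < vals.length := Nat.div_lt_self hp (by norm_num)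
      have hget : vals.getD (vals.length / 2) 0 = vals[vals.length / 2] :=
        List.getD_eq_getElem vals 0 hmlt
      have hdecomp :
          vals = vals.take (vals.length / 2)
            ++ vals[vals.length / 2] :: vals.drop (vals.length / 2 + 1) := by
        conv_lhs => rw [← List.take_append_drop (vals.length / 2) vals,
          List.drop_eq_getElem_cons hmlt]
      simp only [Bool.false_eq_true, if_false]
      rw [ih _ _ _ (by rw [List.length_take]; omega),
        ih _ _ _ (by rw [List.length_drop]; omega), hget, ← gRef_split]
      conv_rhs => rw [hdecomp]

theorem pyGaps_eq_gRef (lo hi : Int) (vals : List Int) :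
    pyGaps lo hi vals = gRef lo hi vals :=
  pyGapsGo_eq_gRef vals.length lo hi vals le_rfl

-- ===== VERDICT (by name: the statement is the Claim_ definition above) =====
theorem find_missing_intervals_spec : Claim_equal_find_missing_intervals := by
  intro x start end_ _
  unfold Spec_find_missing_intervals find_missing_intervals find_missing_intervals_alt
  simp only []
  set left := pyBisectLeft x start with hleft
  set right := pyBisectRight x end_ with hright
  have hL : left ≤ x.length := pyBisectLeftLoop_le x start x.length 0 x.length (Nat.zero_le _)
  have hR : right ≤ x.length := pyBisectRightLoop_le x end_ x.length 0 x.length (Nat.zero_le _)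
  set c0 : Int :=
    if left == 0 || x.getD (left - 1) 0 < start then start else x.getD (left - 1) 0 + 1
  have hbound : left + (right - left) ≤ x.length := by omega
  have hidx := foldl_range'_getD x
      (fun (st : List (List Int) × Int) v =>
        ((if v > st.2 then st.1 ++ [[st.2, v - 1]] else st.1), v + 1))
      (right - left) left (([], c0)) hbound
  rw [hidx]
  have := foldA end_ ((x.drop left).take (right - left)) [] c0
  simp only [List.nil_append] at this
  rw [this, pyGaps_eq_gRef]
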